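-- pv_equiv track=rewrite | github.com/sslog2/Unip--Automato | outros/mascaracpf.py | mascara_cpf
-- ===== SOURCE A (Python) =====
-- def mascara_cpf(cpf):
--     estado = 'q0'
--     cpf_mascarado = ""
--
--     for char in cpf:
--         if estado == 'q0':
--             cpf_mascarado += 'X'
--             estado = 'q1'
--         elif estado == 'q1':
--             cpf_mascarado += 'X'
--             estado = 'q2'
--         elif estado == 'q2':
--             cpf_mascarado += 'X'
--             estado = 'q3'
--         elif estado == 'q3':
--             cpf_mascarado += char
--             estado = 'q4'
--         elif estado == 'q4':
--             cpf_mascarado += char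
--             estado = 'q5'
--         elif estado == 'q5':
--             cpf_mascarado += char
--             estado = 'q6'
--         elif estado == 'q6':
--             cpf_mascarado += char
--             estado = 'q7'
--         elif estado == 'q7':
--             cpf_mascarado += char
--             estado = 'q8'
--         elif estado == 'q8':
--             cpf_mascarado += char
--             estado = 'q9'
--         elif estado == 'q9':
--             cpf_mascarado += 'X'
--             estado = 'q10'
--         elif estado == 'q10':
--             cpf_mascarado += 'X'
--             estado = 'q_aceita'
--         elif estado == 'q_aceita':
--             return f"CPF mascarado com sucesso! ==> {cpf_mascarado}"
--         else:
--             estado = 'q_rejeita'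
--             return "CPF inválido, tente novamente."
--
--     return "CPF inválido, tente novamente." if estado != 'q_aceita' else cpf_mascarado
-- ===== SOURCE B (Python) =====
-- def mascara_cpf(cpf):
--     n = len(cpf)
--     if n < 11:
--         return "CPF inválido, tente novamente."
--     masked = 'XXX' + cpf[3:9] + 'XX'
--     if n == 11:
--         return masked
--     return f"CPF mascarado com sucesso! ==> {masked}"
-- ===== Notes on version B (the rewrite author's own statement) =====
-- stated objective: simpler
-- what changed: Replaced the twelve-state character-by-character automaton with a length check plus direct slicing that masks the first three and last two of the eleven kept characters, returning the plain masked string at length eleven and the success message at length twelve or more.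
import Mathlib
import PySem

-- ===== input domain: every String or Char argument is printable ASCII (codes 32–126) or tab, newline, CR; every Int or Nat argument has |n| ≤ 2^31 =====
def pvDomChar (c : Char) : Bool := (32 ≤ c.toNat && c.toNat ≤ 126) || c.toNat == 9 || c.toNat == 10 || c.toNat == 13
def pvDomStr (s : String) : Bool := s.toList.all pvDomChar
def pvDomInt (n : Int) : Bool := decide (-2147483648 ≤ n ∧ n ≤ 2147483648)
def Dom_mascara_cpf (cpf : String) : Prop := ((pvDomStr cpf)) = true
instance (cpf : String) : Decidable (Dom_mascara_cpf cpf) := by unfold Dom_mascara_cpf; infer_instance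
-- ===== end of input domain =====

-- B replaces A's 12-state char-by-char automaton with a length check and direct slicing (simpler).

-- ===== PORT A =====
-- the for-loop of A: state machine over the characters; acc is cpf_mascarado (built left to right)
def mascaraLoopA : List Char → String → List Char → String
  | [], estado, acc =>
      -- final 'return "CPF inválido…" if estado != q_aceita else cpf_mascarado'
      if estado ≠ "q_aceita" then "CPF inválido, tente novamente." else String.ofList acc
  | c :: rest, estado, acc =>
      if estado = "q0" then mascaraLoopA rest "q1" (acc ++ ['X'])
      else if estado = "q1" then mascaraLoopA rest "q2" (acc ++ ['X'])
      else if estado = "q2" then mascaraLoopA rest "q3" (acc ++ ['X'])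
      else if estado = "q3" then mascaraLoopA rest "q4" (acc ++ [c])
      else if estado = "q4" then mascaraLoopA rest "q5" (acc ++ [c])
      else if estado = "q5" then mascaraLoopA rest "q6" (acc ++ [c])
      else if estado = "q6" then mascaraLoopA rest "q7" (acc ++ [c])
      else if estado = "q7" then mascaraLoopA rest "q8" (acc ++ [c])
      else if estado = "q8" then mascaraLoopA rest "q9" (acc ++ [c])
      else if estado = "q9" then mascaraLoopA rest "q10" (acc ++ ['X'])
      else if estado = "q10" then mascaraLoopA rest "q_aceita" (acc ++ ['X'])
      else if estado = "q_aceita" then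
        String.ofList ("CPF mascarado com sucesso! ==> ".toList ++ acc)
      else "CPF inválido, tente novamente."

def mascara_cpf (cpf : String) : String := mascaraLoopA cpf.toList "q0" []

-- ===== PORT B =====
def mascara_cpf_alt (cpf : String) : String :=
  let n := cpf.toList.length
  if n < 11 then "CPF inválido, tente novamente."
  else
    let masked : List Char := "XXX".toList ++ PySem.List.slice cpf.toList (some 3) (some 9) ++ "XX".toList
    if n = 11 then String.ofList masked
    else String.ofList ("CPF mascarado com sucesso! ==> ".toList ++ masked)

-- ===== PRECONDITION & SPEC =====
def Spec_mascara_cpf (cpf : String) (out : String) : Prop := out = mascara_cpf_alt cpf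
instance (cpf : String) (out : String) : Decidable (Spec_mascara_cpf cpf out) := by unfold Spec_mascara_cpf; infer_instance

-- ===== CLAIM (what is proved, stated in full; the proofs are below) =====
def Claim_equal_mascara_cpf : Prop := ∀ (cpf : String), Dom_mascara_cpf cpf → Spec_mascara_cpf cpf (mascara_cpf cpf)

-- ===== LEMMAS AND PROOFS =====

-- the slice cpf[3:9] on any string of length ≥ 11, spelled out
theorem slice39 (a b c d e f g h i j k : Char) (rest : List Char) :
    PySem.List.slice (a::b::c::d::e::f::g::h::i::j::k::rest) (some 3) (some 9) = [d,e,f,g,h,i] := by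
  rw [PySem.List.slice_toNat] <;> try norm_num
  rfl

-- list-level equivalence, by exhaustive case split on the first 12 characters
theorem mascara_list_eq (l : List Char) :
    mascaraLoopA l "q0" [] =
      (if l.length < 11 then "CPF inválido, tente novamente."
       else
        let masked : List Char := "XXX".toList ++ PySem.List.slice l (some 3) (some 9) ++ "XX".toList
        if l.length = 11 then String.ofList masked
        else String.ofList ("CPF mascarado com sucesso! ==> ".toList ++ masked)) := by
  match l with
  | [] => simp [mascaraLoopA]
  | [a] => simp [mascaraLoopA]
  | [a,b] => simp [mascaraLoopA]
  | [a,b,c] => simp [mascaraLoopA]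
  | [a,b,c,d] => simp [mascaraLoopA]
  | [a,b,c,d,e] => simp [mascaraLoopA]
  | [a,b,c,d,e,f] => simp [mascaraLoopA]
  | [a,b,c,d,e,f,g] => simp [mascaraLoopA]
  | [a,b,c,d,e,f,g,h] => simp [mascaraLoopA]
  | [a,b,c,d,e,f,g,h,i] => simp [mascaraLoopA]
  | [a,b,c,d,e,f,g,h,i,j] => simp [mascaraLoopA]
  | [a,b,c,d,e,f,g,h,i,j,k] =>
      simp [mascaraLoopA, slice39]
  | a :: b :: c :: d :: e :: f :: g :: h :: i :: j :: k :: m :: rest =>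
      have h1 : ¬ (a :: b :: c :: d :: e :: f :: g :: h :: i :: j :: k :: m :: rest).length < 11 := by
        simp only [List.length_cons]; omega
      have h2 : ¬ (a :: b :: c :: d :: e :: f :: g :: h :: i :: j :: k :: m :: rest).length = 11 := by
        simp only [List.length_cons]; omega
      rw [if_neg h1, if_neg h2]
      simp [mascaraLoopA, slice39 a b c d e f g h i j k (m :: rest)]

-- ===== VERDICT (by name: the statement is the Claim_ definition above) =====
theorem mascara_cpf_spec : Claim_equal_mascara_cpf := by
  intro cpf _
  unfold Spec_mascara_cpf mascara_cpf mascara_cpf_alt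
  exact mascara_list_eq cpf.toList
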